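-- pv_equiv track=rewrite | github.com/LinguaTech-Yapay-Zeka/Teknofest-TDDI-2024 | Model/model_fonksiyonlari.py | phrase_separator
-- ===== SOURCE A (Python) =====
-- from collections import defaultdict
--
-- def phrase_separator(entity_phrases):
--     new_dict = defaultdict(list)
--     for key, value in entity_phrases.items():
--         new_list = []
--         for phrase in value:
--             new_list.append(phrase)
--             if len(phrase.split(' ')) >= 3:
--                 string = ' '.join(new_list)
--                 new_dict[key].append(string)
--                 new_list = []
--
--         if len(new_list) > 0:
--             string = ' '.join(new_list)
--             new_dict[key].append(string)
--     return new_dict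
-- ===== SOURCE B (Python) =====
-- from collections import defaultdict
--
-- def _first_long(value):
--     for i, phrase in enumerate(value):
--         if len(phrase.split(' ')) >= 3:
--             return i
--     return None
--
-- def _chunks(value):
--     if not value:
--         return []
--     i = _first_long(value)
--     if i is None:
--         return [' '.join(value)]
--     return [' '.join(value[:i + 1])] + _chunks(value[i + 1:])
--
-- def phrase_separator(entity_phrases):
--     new_dict = defaultdict(list)
--     for key, value in entity_phrases.items():
--         if value:
--             new_dict[key] = _chunks(value)
--     return new_dict
-- ===== Notes on version B (the rewrite author's own statement) =====
-- stated objective: alternative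
-- what changed: A grows an accumulator list phrase by phrase and flushes it at each long phrase and at the end; B recursively splits each value list at the index of its first >=3-word phrase (find-first, slice, recurse) and assigns the whole chunk list per key at once.
import Mathlib
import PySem

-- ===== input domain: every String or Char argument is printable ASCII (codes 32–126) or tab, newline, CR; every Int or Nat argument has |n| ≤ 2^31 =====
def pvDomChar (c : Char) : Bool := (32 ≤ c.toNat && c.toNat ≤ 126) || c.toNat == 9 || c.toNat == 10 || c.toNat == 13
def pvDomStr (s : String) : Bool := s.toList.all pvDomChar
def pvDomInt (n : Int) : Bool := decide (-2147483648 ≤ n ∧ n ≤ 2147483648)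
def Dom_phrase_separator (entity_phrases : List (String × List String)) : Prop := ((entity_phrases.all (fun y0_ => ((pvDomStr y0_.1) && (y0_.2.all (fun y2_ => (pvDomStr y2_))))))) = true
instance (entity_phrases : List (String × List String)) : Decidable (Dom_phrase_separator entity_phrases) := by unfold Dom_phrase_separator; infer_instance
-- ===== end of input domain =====

-- B replaces A's accumulator-with-reset inner loop by a direct recursive chunking of each
-- value list at its first long phrase (find-first-index, slice, recurse) and assigns the whole
-- chunk list per key at once; objective: alternative decomposition (same asymptotic cost).

-- ===== PORT A =====
-- len(phrase.split(' ')) >= 3  (sep " " ≠ "", so split? is some)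
def pvIsLong (phrase : String) : Bool := decide (3 ≤ ((PySem.Str.split? phrase " ").getD []).length)

-- the body of A's inner 'for phrase in value' loop (state: new_dict, new_list)
def pvStepA (k : String) (st : PySem.Dict String (List String) × List String) (phrase : String) :
    PySem.Dict String (List String) × List String :=
  if pvIsLong phrase then
    (st.1.modify k [] (· ++ [PySem.Str.join " " (st.2 ++ [phrase])]), [])
  else
    (st.1, st.2 ++ [phrase])

-- A's per-key body: run the inner loop from (new_dict, []), then flush a nonempty new_list
def pvBodyA (new_dict : PySem.Dict String (List String)) (kv : String × List String) :
    PySem.Dict String (List String) :=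
  if 0 < (kv.2.foldl (pvStepA kv.1) (new_dict, [])).2.length then
    (kv.2.foldl (pvStepA kv.1) (new_dict, [])).1.modify kv.1 []
      (· ++ [PySem.Str.join " " (kv.2.foldl (pvStepA kv.1) (new_dict, [])).2])
  else
    (kv.2.foldl (pvStepA kv.1) (new_dict, [])).1

def phrase_separator (entity_phrases : List (String × List String)) : List (String × List String) :=
  (entity_phrases.foldl pvBodyA PySem.Dict.empty).items

-- ===== PORT B =====
-- _first_long(value): index of first phrase with >= 3 words, or None
def pvFirstLong? (value : List String) : Option Nat := value.findIdx? pvIsLong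

-- _chunks(value): split value into chunks, each ending at a long phrase
def pvChunks (value : List String) : List String :=
  if h : value = [] then []
  else
    match pvFirstLong? value with
    | none => [PySem.Str.join " " value]
    | some i => PySem.Str.join " " (value.take (i + 1)) :: pvChunks (value.drop (i + 1))
termination_by value.length
decreasing_by
  simp only [List.length_drop]
  have : 0 < value.length := List.length_pos_iff.mpr h
  omega

def phrase_separator_alt (entity_phrases : List (String × List String)) : List (String × List String) :=
  (entity_phrases.foldl
    (fun (new_dict : PySem.Dict String (List String)) kv =>
      if kv.2 = [] then new_dict else new_dict.insert kv.1 (pvChunks kv.2))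
    PySem.Dict.empty).items

-- ===== PRECONDITION & SPEC =====
-- Pre_ excludes association lists with duplicate keys: A's argument is a Python dict, which
-- cannot hold a key twice, so such lists do not represent any input A is ever called on.
def Pre_phrase_separator (entity_phrases : List (String × List String)) : Prop :=
  (entity_phrases.map Prod.fst).Nodup
instance (entity_phrases : List (String × List String)) : Decidable (Pre_phrase_separator entity_phrases) := by unfold Pre_phrase_separator; infer_instance

def pvWitness_phrase_separator : (List (String × List String)) :=
  [("PER", ["x y z", "a", "b"]), ("LOC", [])]

def Spec_phrase_separator (entity_phrases : List (String × List String)) (out : List (String × List String)) : Prop := out = phrase_separator_alt entity_phrases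
instance (entity_phrases : List (String × List String)) (out : List (String × List String)) : Decidable (Spec_phrase_separator entity_phrases out) := by unfold Spec_phrase_separator; infer_instance

-- ===== CLAIM (what is proved, stated in full; the proofs are below) =====
def Claim_equal_phrase_separator : Prop := ∀ (entity_phrases : List (String × List String)), Dom_phrase_separator entity_phrases → Pre_phrase_separator entity_phrases → Spec_phrase_separator entity_phrases (phrase_separator entity_phrases)

-- ===== LEMMAS AND PROOFS =====

-- d.modify k [] (· ++ [c]) is definitionally an insert of the extended list
theorem pv_modify_append (d : PySem.Dict String (List String)) (k : String) (c : String) :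
    d.modify k [] (· ++ [c]) = d.insert k (d.getD k [] ++ [c]) := rfl

-- folding the per-chunk append over a nonempty chunk list is one insert of the whole list
theorem pv_foldl_append_chunks (k : String) :
    ∀ (cs : List String) (d : PySem.Dict String (List String)), cs ≠ [] →
      cs.foldl (fun d c => d.modify k [] (· ++ [c])) d = d.insert k (d.getD k [] ++ cs)
  | [], _, h => absurd rfl h
  | c :: cs, d, _ => by
    rw [List.foldl_cons]
    rcases eq_or_ne cs [] with rfl | hcs
    · simp [pv_modify_append]
    · rw [pv_foldl_append_chunks k cs _ hcs, pv_modify_append, PySem.Dict.getD_insert_self,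
        PySem.Dict.insert_insert_self, List.append_assoc]
      rfl

theorem pv_firstLong_none {nl : List String} (h : ∀ p ∈ nl, pvIsLong p = false) :
    pvFirstLong? nl = none := by
  unfold pvFirstLong?
  rw [List.findIdx?_eq_none_iff]
  exact h

theorem pv_firstLong_append {nl : List String} (p : String) (rest : List String)
    (h : ∀ q ∈ nl, pvIsLong q = false) (hp : pvIsLong p = true) :
    pvFirstLong? (nl ++ p :: rest) = some nl.length := by
  unfold pvFirstLong?
  induction nl with
  | nil => simp [List.findIdx?_cons, hp]
  | cons a as ih =>
    have ha : pvIsLong a = false := h a List.mem_cons_self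
    simp only [List.cons_append, List.findIdx?_cons, ha]
    rw [ih (fun q hq => h q (List.mem_cons_of_mem a hq))]
    simp

-- the crux: A's inner accumulator loop (then final flush) appends exactly pvChunks (nl ++ value)
theorem pv_inner (k : String) :
    ∀ (value nl : List String) (d : PySem.Dict String (List String)),
      (∀ p ∈ nl, pvIsLong p = false) →
      (if 0 < (value.foldl (pvStepA k) (d, nl)).2.length then
        (value.foldl (pvStepA k) (d, nl)).1.modify k []
          (· ++ [PySem.Str.join " " (value.foldl (pvStepA k) (d, nl)).2])
      else (value.foldl (pvStepA k) (d, nl)).1)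
      = (pvChunks (nl ++ value)).foldl (fun d c => d.modify k [] (· ++ [c])) d
  | [], nl, d, h => by
    simp only [List.foldl_nil, List.append_nil]
    rcases eq_or_ne nl [] with rfl | hnl
    · simp [pvChunks]
    · rw [pvChunks]
      simp [hnl, pv_firstLong_none h, List.length_pos_iff]
  | p :: rest, nl, d, h => by
    by_cases hp : pvIsLong p = true
    · have hstep : pvStepA k (d, nl) p
          = (d.modify k [] (· ++ [PySem.Str.join " " (nl ++ [p])]), []) := by
        simp [pvStepA, hp]
      rw [List.foldl_cons, hstep, pv_inner k rest [] _ (by simp)]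
      simp only [List.nil_append]
      have hne : nl ++ p :: rest ≠ [] := by simp
      conv_rhs => rw [pvChunks]
      rw [dif_neg hne, pv_firstLong_append p rest h hp]
      have h1 : (nl ++ p :: rest).take (nl.length + 1) = nl ++ [p] := by
        rw [List.take_append]
        simp
      have h2 : (nl ++ p :: rest).drop (nl.length + 1) = rest := by
        rw [List.drop_append]
        simp
      simp only [h1, h2, List.foldl_cons]
    · have hstep : pvStepA k (d, nl) p = (d, nl ++ [p]) := by
        simp [pvStepA, hp]
      rw [List.foldl_cons, hstep,
        pv_inner k rest (nl ++ [p]) d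
          (by
            intro q hq
            rcases List.mem_append.mp hq with hq | hq
            · exact h q hq
            · simp only [List.mem_singleton] at hq
              subst hq
              exact eq_false_of_ne_true hp),
        List.append_assoc, List.singleton_append]
  termination_by value => value.length

-- one fresh-key entry: A's whole per-key body equals B's
theorem pv_step (kv : String × List String) (d : PySem.Dict String (List String))
    (hk : d.contains kv.1 = false) :
    pvBodyA d kv = (if kv.2 = [] then d else d.insert kv.1 (pvChunks kv.2)) := by
  unfold pvBodyA
  rw [show (d, ([] : List String)) = (d, [])from rfl]
  rw [pv_inner kv.1 kv.2 [] d (by simp)]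
  simp only [List.nil_append]
  rcases eq_or_ne kv.2 [] with he | hv
  · rw [he]
    simp [pvChunks]
  · have hcs : pvChunks kv.2 ≠ [] := by
      rw [pvChunks]
      simp only [hv, dite_false]
      cases pvFirstLong? kv.2 <;> simp
    rw [pv_foldl_append_chunks kv.1 _ d hcs, if_neg hv,
        PySem.Dict.getD_of_not_contains d [] hk, List.nil_append]

theorem pv_outer :
    ∀ (l : List (String × List String)) (d : PySem.Dict String (List String)),
      (∀ kv ∈ l, d.contains kv.1 = false) → (l.map Prod.fst).Nodup →
      l.foldl pvBodyA d
      = l.foldl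
          (fun (new_dict : PySem.Dict String (List String)) kv =>
            if kv.2 = [] then new_dict else new_dict.insert kv.1 (pvChunks kv.2)) d
  | [], d, _, _ => rfl
  | kv :: l, d, hfresh, hnodup => by
    simp only [List.foldl_cons]
    rw [pv_step kv d (hfresh kv List.mem_cons_self)]
    apply pv_outer l
    · intro kv' hkv'
      have hne : kv'.1 ≠ kv.1 := by
        simp only [List.map_cons, List.nodup_cons] at hnodup
        intro he
        exact hnodup.1 (he ▸ List.mem_map_of_mem hkv')
      split
      · exact hfresh kv' (List.mem_cons_of_mem kv hkv')
      · rw [PySem.Dict.contains_insert]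
        simp [hne, hfresh kv' (List.mem_cons_of_mem kv hkv')]
    · simp only [List.map_cons, List.nodup_cons] at hnodup
      exact hnodup.2

-- ===== VERDICT (by name: the statement is the Claim_ definition above) =====
theorem phrase_separator_spec : Claim_equal_phrase_separator := by
  intro eps _ hpre
  unfold Spec_phrase_separator phrase_separator phrase_separator_alt
  rw [pv_outer eps PySem.Dict.empty (fun kv _ => by simp [PySem.Dict.contains_empty]) hpre]
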